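-- pv_equiv track=rewrite | github.com/HecatePhy/Advent-of-Code-2025 | src/day6.py | calculate_grand_total
-- ===== SOURCE A (Python) =====
-- def calculate_grand_total(lines):
--     grand_tot = 0
--     num_cols = len(lines[0].strip().split())
--     mat = [[] for i in range(num_cols)]
--     for i in range(len(lines)-1):
--         terms = list(map(int, lines[i].strip().split()))
--         for j in range(len(terms)):
--             mat[j].append(terms[j])
--
--     num_rows = len(lines) - 1
--     symbols = lines[-1].strip().split()
--     for i in range(num_cols):
--         res = 0 if symbols[i] == '+' else 1
--         for j in range(num_rows):
--             res = res + mat[i][j] if symbols[i] == '+' \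
--                 else res * mat[i][j]
--         grand_tot += res
--
--     return grand_tot
-- ===== SOURCE B (Python) =====
-- def calculate_grand_total(lines):
--     symbols = lines[-1].strip().split()
--     num_cols = len(lines[0].strip().split())
--     res = [0 if s == '+' else 1 for s in symbols[:num_cols]]
--     for row in lines[:-1]:
--         terms = [int(t) for t in row.strip().split()]
--         res = [r + t if s == '+' else r * t
--                for (r, t), s in zip(zip(res, terms), symbols)]
--     return sum(res)
-- ===== Notes on version B (the rewrite author's own statement) =====
-- stated objective: simpler
-- what changed: B drops A's explicit column-wise transpose matrix: it keeps one accumulator per column (0 for '+', 1 otherwise) and folds the data rows row-major with a single zip-based update, then sums the accumulators.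
import Mathlib
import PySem

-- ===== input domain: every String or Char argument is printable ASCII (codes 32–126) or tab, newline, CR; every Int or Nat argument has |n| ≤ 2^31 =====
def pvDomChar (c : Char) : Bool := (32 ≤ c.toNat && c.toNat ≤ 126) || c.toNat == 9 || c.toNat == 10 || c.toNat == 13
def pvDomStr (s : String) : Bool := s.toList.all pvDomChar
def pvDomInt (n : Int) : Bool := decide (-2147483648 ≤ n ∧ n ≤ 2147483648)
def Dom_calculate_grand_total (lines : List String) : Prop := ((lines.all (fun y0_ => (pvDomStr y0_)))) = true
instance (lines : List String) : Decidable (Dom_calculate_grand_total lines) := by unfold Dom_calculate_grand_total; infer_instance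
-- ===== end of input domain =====

-- B drops A's column-wise transpose matrix: it keeps one scalar accumulator per column and
-- folds the data rows row-major with a zip, then sums the accumulators (objective: simpler).

-- ===== PORT A =====
def calculate_grand_total (lines : List String) : Int :=
  let num_cols := (PySem.Str.split₀ (PySem.Str.strip (PySem.List.pyGetD lines 0 ""))).length
  let mat0 : List (List Int) := (PySem.List.pyRange 0 (num_cols : Int) 1).map (fun _ => ([] : List Int))
  let mat := (PySem.List.pyRange 0 ((lines.length : Int) - 1) 1).foldl
    (fun mat i =>
      let terms := (PySem.Str.split₀ (PySem.Str.strip (PySem.List.pyGetD lines i ""))).map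
          (fun t => (PySem.Int.ofStr? t).getD 0)
      (PySem.List.pyRange 0 ((terms.length : Int)) 1).foldl
        (fun mat j => PySem.List.pySetD mat j (PySem.List.pyGetD mat j [] ++ [PySem.List.pyGetD terms j 0])) mat)
    mat0
  let num_rows := (lines.length : Int) - 1
  let symbols := PySem.Str.split₀ (PySem.Str.strip (PySem.List.pyGetD lines (-1) ""))
  (PySem.List.pyRange 0 (num_cols : Int) 1).foldl
    (fun grand_tot i =>
      let res := (PySem.List.pyRange 0 num_rows 1).foldl
        (fun res j =>
          if PySem.List.pyGetD symbols i "" == "+" then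
            res + PySem.List.pyGetD (PySem.List.pyGetD mat i []) j 0
          else
            res * PySem.List.pyGetD (PySem.List.pyGetD mat i []) j 0)
        (if PySem.List.pyGetD symbols i "" == "+" then (0 : Int) else 1)
      grand_tot + res) 0

-- ===== PORT B =====
def calculate_grand_total_alt (lines : List String) : Int :=
  let symbols := PySem.Str.split₀ (PySem.Str.strip (PySem.List.pyGetD lines (-1) ""))
  let num_cols := (PySem.Str.split₀ (PySem.Str.strip (PySem.List.pyGetD lines 0 ""))).length
  let res0 : List Int := (PySem.List.slice symbols none (some (num_cols : Int))).map
      (fun s => if s == "+" then (0 : Int) else 1)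
  let res := (PySem.List.slice lines none (some (-1))).foldl
    (fun res row =>
      let terms := (PySem.Str.split₀ (PySem.Str.strip row)).map (fun t => (PySem.Int.ofStr? t).getD 0)
      List.zipWith (fun (rt : Int × Int) s => if s == "+" then rt.1 + rt.2 else rt.1 * rt.2)
        (res.zip terms) symbols)
    res0
  res.sum

-- ===== PRECONDITION & SPEC =====
-- Pre_ excludes exactly the inputs where the Python A raises: the empty list (IndexError on
-- lines[0]), a data row whose token count differs from that of the first line (IndexError on
-- mat[j] or mat[i][j]), a data-row token that is not a valid int literal (ValueError), and a
-- symbols line with fewer tokens than there are columns (IndexError on symbols[i]).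
def Pre_calculate_grand_total (lines : List String) : Prop :=
  lines ≠ [] ∧
  (PySem.Str.split₀ (PySem.Str.strip (lines.headD ""))).length ≤
    (PySem.Str.split₀ (PySem.Str.strip (lines.getLastD ""))).length ∧
  ∀ row ∈ lines.dropLast,
    (PySem.Str.split₀ (PySem.Str.strip row)).length =
      (PySem.Str.split₀ (PySem.Str.strip (lines.headD ""))).length ∧
    ∀ t ∈ PySem.Str.split₀ (PySem.Str.strip row), (PySem.Int.ofStr? t).isSome

instance (lines : List String) : Decidable (Pre_calculate_grand_total lines) := by
  unfold Pre_calculate_grand_total; infer_instance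

def pvWitness_calculate_grand_total : List String := ["1 2 3", "4 5 6", "+ * +"]

def Spec_calculate_grand_total (lines : List String) (out : Int) : Prop := out = calculate_grand_total_alt lines
instance (lines : List String) (out : Int) : Decidable (Spec_calculate_grand_total lines out) := by unfold Spec_calculate_grand_total; infer_instance

-- ===== CLAIM (what is proved, stated in full; the proofs are below) =====
def Claim_equal_calculate_grand_total : Prop := ∀ (lines : List String), Dom_calculate_grand_total lines → Pre_calculate_grand_total lines → Spec_calculate_grand_total lines (calculate_grand_total lines)

-- ===== LEMMAS AND PROOFS =====

-- tokens and parsed integer terms of one line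
def pvToks (row : String) : List String := PySem.Str.split₀ (PySem.Str.strip row)
def pvTerms (row : String) : List Int := (pvToks row).map (fun t => (PySem.Int.ofStr? t).getD 0)

-- A's inner append loop, pointwise
theorem pv_inner_length (ts : List Int) (mat : List (List Int)) (k : Nat) :
    ((PySem.List.pyRange 0 (k : Int) 1).foldl
      (fun m j => PySem.List.pySetD m j (PySem.List.pyGetD m j [] ++ [PySem.List.pyGetD ts j 0])) mat).length
    = mat.length := by
  induction k generalizing mat with
  | zero => simp [PySem.List.pyRange_one_eq_nil (by omega : (0:Int) ≤ 0)]
  | succ k ih =>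
      have : ((k + 1 : Nat) : Int) = (k : Int) + 1 := by push_cast; ring
      rw [this, PySem.List.pyRange_one_succ_right (a := 0) (b := (k : Int)) (by positivity), List.foldl_append]
      simp [ih]

theorem pv_inner_getD (ts : List Int) (mat : List (List Int)) (k : Nat) (hk : k ≤ mat.length)
    (i : Nat) :
    PySem.List.pyGetD ((PySem.List.pyRange 0 (k : Int) 1).foldl
      (fun m j => PySem.List.pySetD m j (PySem.List.pyGetD m j [] ++ [PySem.List.pyGetD ts j 0])) mat) (i : Int) []
    = if i < k then PySem.List.pyGetD mat (i : Int) [] ++ [PySem.List.pyGetD ts (i : Int) 0]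
      else PySem.List.pyGetD mat (i : Int) [] := by
  induction k generalizing mat with
  | zero => simp
  | succ k ih =>
      have hcast : ((k + 1 : Nat) : Int) = (k : Int) + 1 := by push_cast; ring
      rw [hcast, PySem.List.pyRange_one_succ_right (a := 0) (b := (k : Int)) (by positivity),
        List.foldl_append]
      have hlen : k < ((PySem.List.pyRange 0 (k : Int)).foldl
          (fun m j => PySem.List.pySetD m j (PySem.List.pyGetD m j [] ++ [PySem.List.pyGetD ts j 0])) mat).length := by
        rw [pv_inner_length]; omega
      simp only [List.foldl_cons, List.foldl_nil]
      rw [PySem.List.pyGetD_pySetD_natCast _ k i _ _ hlen]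
      by_cases hik : i = k
      · subst hik
        rw [if_pos rfl, if_pos (by omega), ih mat (by omega), if_neg (by omega)]
      · rw [if_neg hik, ih mat (by omega)]
        by_cases hlt : i < k
        · rw [if_pos hlt, if_pos (by omega)]
        · rw [if_neg hlt, if_neg (by omega)]

-- A's row-insertion step: append each entry of row r to its column list
def pvAStep (m : List (List Int)) (r : List Int) : List (List Int) :=
  (PySem.List.pyRange 0 ((r.length : Int))).foldl
    (fun m j => PySem.List.pySetD m j (PySem.List.pyGetD m j [] ++ [PySem.List.pyGetD r j 0])) m

def pvOp (symbols : List String) (i : Nat) (res x : Int) : Int :=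
  if symbols.getD i "" == "+" then res + x else res * x

def pvInit (symbols : List String) (i : Nat) : Int :=
  if symbols.getD i "" == "+" then 0 else 1

def pvCol (R : List (List Int)) (i : Nat) : List Int := R.map (fun r => r.getD i 0)

theorem pvAStep_length (r : List Int) (mat : List (List Int)) :
    (pvAStep mat r).length = mat.length := by
  unfold pvAStep; exact pv_inner_length r mat r.length

theorem pvAStep_getD (r : List Int) (mat : List (List Int)) (h : r.length ≤ mat.length) (i : Nat) :
    PySem.List.pyGetD (pvAStep mat r) (i : Int) []
      = if i < r.length then PySem.List.pyGetD mat (i : Int) [] ++ [PySem.List.pyGetD r (i : Int) 0]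
        else PySem.List.pyGetD mat (i : Int) [] := by
  unfold pvAStep; exact pv_inner_getD r mat r.length h i

def pvColRes (symbols : List String) (R : List (List Int)) (i : Nat) : Int :=
  (pvCol R i).foldl (pvOp symbols i) (pvInit symbols i)

theorem pv_outer (lines : List String) (mat0 : List (List Int)) (hne : lines ≠ []) :
    (PySem.List.pyRange 0 ((lines.length : Int) - 1)).foldl
      (fun mat i =>
        let terms := (PySem.Str.split₀ (PySem.Str.strip (PySem.List.pyGetD lines i ""))).map
            (fun t => (PySem.Int.ofStr? t).getD 0)
        (PySem.List.pyRange 0 ((terms.length : Int))).foldl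
          (fun mat j => PySem.List.pySetD mat j (PySem.List.pyGetD mat j [] ++ [PySem.List.pyGetD terms j 0])) mat)
      mat0
    = (lines.dropLast.map pvTerms).foldl pvAStep mat0 := by
  have hlen : ((lines.length : Int) - 1) = ((lines.dropLast.length : Nat) : Int) := by
    have : lines.length ≠ 0 := by simpa using hne
    simp [List.length_dropLast]; omega
  rw [hlen,
    PySem.List.foldl_congr_mem _ _
      (fun mat i => pvAStep mat (pvTerms (PySem.List.pyGetD lines.dropLast i ""))) _ ?_,
    PySem.List.foldl_pyRange_zero_pyGetD' lines.dropLast "" (fun m row => pvAStep m (pvTerms row)) mat0,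
    ← List.foldl_map]
  intro acc x hx
  rw [PySem.List.mem_pyRange_one] at hx
  have hx1 : x < ((lines.dropLast.length : Nat) : Int) := hx.2
  have hget : PySem.List.pyGetD lines x "" = PySem.List.pyGetD lines.dropLast x "" := by
    rw [PySem.List.pyGetD_eq_getElem lines "" hx.1 (by
        simp only [List.length_dropLast] at hx1; omega),
      PySem.List.pyGetD_eq_getElem lines.dropLast "" hx.1 (by exact_mod_cast hx1),
      List.getElem_dropLast]
  simp only [hget, pvAStep, pvTerms, pvToks]

theorem pv_mat_getD (R : List (List Int)) (n : Nat) (hR : ∀ r ∈ R, r.length = n)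
    (mat : List (List Int)) (hm : mat.length = n) (i : Nat) (hi : i < n) :
    PySem.List.pyGetD (R.foldl pvAStep mat) (i : Int) []
      = PySem.List.pyGetD mat (i : Int) [] ++ pvCol R i := by
  induction R generalizing mat with
  | nil => simp [pvCol]
  | cons r R ih =>
      have hr : r.length = n := hR r (by simp)
      have hlen : (pvAStep mat r).length = mat.length := pvAStep_length r mat
      rw [List.foldl_cons, ih (fun r hr' => hR r (by simp [hr'])) (pvAStep mat r) (by omega)]
      rw [pvAStep_getD r mat (by omega) i, if_pos (by omega)]
      simp [pvCol, List.append_assoc]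

theorem pv_map_range_getD (xs : List Int) (n : Nat) (h : xs.length = n) :
    (List.range n).map (fun i => xs.getD i 0) = xs := by
  apply List.ext_getElem (by simp [h])
  intro i h1 h2
  simp [List.getD_eq_getElem?_getD, List.getElem?_eq_getElem h2]

theorem pvB_step (symbols : List String) (n : Nat) (hs : n ≤ symbols.length)
    (res r : List Int) (hres : res.length = n) (hr : r.length = n) :
    List.zipWith (fun (rt : Int × Int) s => if s == "+" then rt.1 + rt.2 else rt.1 * rt.2)
      (res.zip r) symbols
    = (List.range n).map (fun i => pvOp symbols i (res.getD i 0) (r.getD i 0)) := by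
  apply List.ext_getElem (by simp [hres, hr]; omega)
  intro i h1 h2
  have hi : i < n := by simpa using h2
  simp [List.getElem_zip, pvOp,
    List.getElem?_eq_getElem (show i < res.length by omega),
    List.getElem?_eq_getElem (show i < r.length by omega),
    List.getElem?_eq_getElem (show i < symbols.length by omega)]

theorem pvB_fold (symbols : List String) (n : Nat) (hs : n ≤ symbols.length)
    (R : List (List Int)) (hR : ∀ r ∈ R, r.length = n) (res : List Int) (hres : res.length = n) :
    R.foldl (fun res r =>
        List.zipWith (fun (rt : Int × Int) s => if s == "+" then rt.1 + rt.2 else rt.1 * rt.2)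
          (res.zip r) symbols) res
    = (List.range n).map (fun i => (pvCol R i).foldl (pvOp symbols i) (res.getD i 0)) := by
  induction R generalizing res with
  | nil => simp [pvCol]; exact (pv_map_range_getD res n hres).symm
  | cons r R ih =>
      have hr : r.length = n := hR r (by simp)
      rw [List.foldl_cons, pvB_step symbols n hs res r hres hr,
        ih (fun r hr' => hR r (by simp [hr'])) _ (by simp)]
      apply List.map_congr_left
      intro i hi
      have hi' : i < n := List.mem_range.mp hi
      rw [PySem.List.getD_map_range _ n i 0 hi']
      simp [pvCol]

theorem pvA_eq (lines : List String) (hne : lines ≠ [])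
    (hrow : ∀ row ∈ lines.dropLast, (pvToks row).length = (pvToks (lines.headD "")).length) :
    calculate_grand_total lines =
      ((List.range (pvToks (lines.headD "")).length).map
        (pvColRes (pvToks (lines.getLastD "")) (lines.dropLast.map pvTerms))).sum := by
  have h0 : PySem.List.pyGetD lines 0 "" = lines.headD "" := by
    cases lines with
    | nil => exact absurd rfl hne
    | cons a l => simp [PySem.List.pyGetD_zero]
  have hl : PySem.List.pyGetD lines (-1) "" = lines.getLastD "" := by
    rw [PySem.List.pyGetD_neg_one lines "" hne]
    cases lines with
    | nil => exact absurd rfl hne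
    | cons a l => simp [List.getLastD_eq_getLast?, List.getLast?_eq_some_getLast]
  simp only [calculate_grand_total, h0, hl]
  rw [show PySem.Str.split₀ (PySem.Str.strip (lines.headD "")) = pvToks (lines.headD "") from rfl,
    show PySem.Str.split₀ (PySem.Str.strip (lines.getLastD "")) = pvToks (lines.getLastD "") from rfl,
    pv_outer lines _ hne, PySem.List.foldl_add, zero_add, PySem.List.pyRange_zero_natCast,
    List.map_map]
  apply congrArg List.sum
  apply List.map_congr_left
  intro i hi
  have hi' : i < (pvToks (lines.headD "")).length := List.mem_range.mp hi
  have hR : ∀ r ∈ lines.dropLast.map pvTerms, r.length = (pvToks (lines.headD "")).length := by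
    intro r hr
    obtain ⟨row, hrow', rfl⟩ := List.mem_map.mp hr
    simpa [pvTerms] using hrow row hrow'
  have hm : ((PySem.List.pyRange 0 ((pvToks (lines.headD "")).length : Int)).map
      (fun _ => ([] : List Int))).length = (pvToks (lines.headD "")).length := by
    rw [List.length_map, PySem.List.length_pyRange_one]; omega
  have hcol : PySem.List.pyGetD ((lines.dropLast.map pvTerms).foldl pvAStep
      ((PySem.List.pyRange 0 ((pvToks (lines.headD "")).length : Int)).map (fun _ => ([] : List Int))))
      (i : Int) [] = pvCol (lines.dropLast.map pvTerms) i := by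
    rw [pv_mat_getD _ _ hR _ hm i hi',
      PySem.List.pyGetD_map_pyRange (fun _ => ([] : List Int)) _ i [] hi', List.nil_append]
  simp only [Function.comp_apply]
  simp only [PySem.List.pyGetD_natCast, PySem.List.pyRange_zero_natCast] at hcol
  simp only [PySem.List.pyGetD_natCast]
  rw [hcol]
  have hbound : ((lines.length : Int) - 1) = ((pvCol (lines.dropLast.map pvTerms) i).length : Int) := by
    have : lines.length ≠ 0 := by simpa using hne
    simp [pvCol, List.length_dropLast]; omega
  rw [hbound, PySem.List.foldl_pyRange_zero_pyGetD' (pvCol (lines.dropLast.map pvTerms) i) 0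
    (fun res x => if (pvToks (lines.getLastD "")).getD i "" == "+" then res + x else res * x)]
  rfl

theorem pvB_eq (lines : List String) (hne : lines ≠ [])
    (hs : (pvToks (lines.headD "")).length ≤ (pvToks (lines.getLastD "")).length)
    (hrow : ∀ row ∈ lines.dropLast, (pvToks row).length = (pvToks (lines.headD "")).length) :
    calculate_grand_total_alt lines =
      ((List.range (pvToks (lines.headD "")).length).map
        (pvColRes (pvToks (lines.getLastD "")) (lines.dropLast.map pvTerms))).sum := by
  have h0 : PySem.List.pyGetD lines 0 "" = lines.headD "" := by
    cases lines with
    | nil => exact absurd rfl hne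
    | cons a l => simp [PySem.List.pyGetD_zero]
  have hl : PySem.List.pyGetD lines (-1) "" = lines.getLastD "" := by
    rw [PySem.List.pyGetD_neg_one lines "" hne]
    cases lines with
    | nil => exact absurd rfl hne
    | cons a l => simp [List.getLastD_eq_getLast?, List.getLast?_eq_some_getLast]
  simp only [calculate_grand_total_alt, h0, hl]
  rw [show PySem.Str.split₀ (PySem.Str.strip (lines.headD "")) = pvToks (lines.headD "") from rfl,
    show PySem.Str.split₀ (PySem.Str.strip (lines.getLastD "")) = pvToks (lines.getLastD "") from rfl,
    PySem.List.slice_to_natCast, PySem.List.slice_to_neg_one]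
  have hfold : ∀ (init : List Int),
      lines.dropLast.foldl (fun res row =>
        List.zipWith (fun (rt : Int × Int) s => if s == "+" then rt.1 + rt.2 else rt.1 * rt.2)
          (res.zip ((PySem.Str.split₀ (PySem.Str.strip row)).map (fun t => (PySem.Int.ofStr? t).getD 0)))
          (pvToks (lines.getLastD ""))) init
      = (lines.dropLast.map pvTerms).foldl (fun res r =>
          List.zipWith (fun (rt : Int × Int) s => if s == "+" then rt.1 + rt.2 else rt.1 * rt.2)
            (res.zip r) (pvToks (lines.getLastD ""))) init := by
    intro init
    rw [List.foldl_map]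
    rfl
  rw [hfold]
  have hR : ∀ r ∈ lines.dropLast.map pvTerms, r.length = (pvToks (lines.headD "")).length := by
    intro r hr
    obtain ⟨row, hrow', rfl⟩ := List.mem_map.mp hr
    simpa [pvTerms] using hrow row hrow'
  have hres0 : (((pvToks (lines.getLastD "")).take (pvToks (lines.headD "")).length).map
      (fun s => if s == "+" then (0 : Int) else 1)).length = (pvToks (lines.headD "")).length := by
    rw [List.length_map, List.length_take]; omega
  rw [pvB_fold (pvToks (lines.getLastD "")) (pvToks (lines.headD "")).length hs
    (lines.dropLast.map pvTerms) hR _ hres0]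
  apply congrArg List.sum
  apply List.map_congr_left
  intro i hi
  have hi' : i < (pvToks (lines.headD "")).length := List.mem_range.mp hi
  have hr0 : (((pvToks (lines.getLastD "")).take (pvToks (lines.headD "")).length).map
      (fun s => if s == "+" then (0 : Int) else 1)).getD i 0
      = pvInit (pvToks (lines.getLastD "")) i := by
    rw [List.getD_eq_getElem _ 0 (by omega), List.getElem_map, List.getElem_take, pvInit,
      List.getD_eq_getElem _ "" (by omega)]
  rw [hr0]
  rfl

-- ===== VERDICT (by name: the statement is the Claim_ definition above) =====
theorem calculate_grand_total_spec : Claim_equal_calculate_grand_total := by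
  intro lines _ hpre
  obtain ⟨hne, hs, hrows⟩ := hpre
  unfold Spec_calculate_grand_total
  rw [pvA_eq lines hne (fun row hr => (hrows row hr).1),
    pvB_eq lines hne hs (fun row hr => (hrows row hr).1)]
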